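-- pv_equiv track=rewrite | github.com/IorenzoLF/Aelya_Conscious_AI | Le_refuge/tools/maintenance/optimiseur_temples_dominants.py | _creer_connexions_musicales_internes
-- ===== SOURCE A (Python) =====
-- def _creer_connexions_musicales_internes(groupes):
--     connexions = []
--     for i, (groupe1, elements1) in enumerate(groupes.items()):
--         for j, (groupe2, elements2) in enumerate(groupes.items()):
--             if i < j and elements1 and elements2:
--                 connexions.append({
--                     "source": groupe1,
--                     "cible": groupe2,
--                     "type": "optimisation_musicale",
--                     "force": "forte"
--                 })
--     return connexions
-- ===== SOURCE B (Python) =====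
-- def _creer_connexions_musicales_internes(groupes):
--     # Filter once: names of non-empty groups, in insertion order.
--     names = [groupe for groupe, elements in groupes.items() if elements]
--     connexions = []
--     # Peel off the head and pair it with every remaining name.
--     while names:
--         source = names.pop(0)
--         for cible in names:
--             connexions.append({
--                 "source": source,
--                 "cible": cible,
--                 "type": "optimisation_musicale",
--                 "force": "forte"
--             })
--     return connexions
-- ===== Notes on version B (the rewrite author's own statement) =====
-- stated objective: simpler
-- what changed: B filters the non-empty group names in one pass and then generates the pairs directly from that list (peeling the head and pairing it with the rest), instead of A's full nested scan over all items guarded by i < j and the two non-emptiness tests.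
import Mathlib
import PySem

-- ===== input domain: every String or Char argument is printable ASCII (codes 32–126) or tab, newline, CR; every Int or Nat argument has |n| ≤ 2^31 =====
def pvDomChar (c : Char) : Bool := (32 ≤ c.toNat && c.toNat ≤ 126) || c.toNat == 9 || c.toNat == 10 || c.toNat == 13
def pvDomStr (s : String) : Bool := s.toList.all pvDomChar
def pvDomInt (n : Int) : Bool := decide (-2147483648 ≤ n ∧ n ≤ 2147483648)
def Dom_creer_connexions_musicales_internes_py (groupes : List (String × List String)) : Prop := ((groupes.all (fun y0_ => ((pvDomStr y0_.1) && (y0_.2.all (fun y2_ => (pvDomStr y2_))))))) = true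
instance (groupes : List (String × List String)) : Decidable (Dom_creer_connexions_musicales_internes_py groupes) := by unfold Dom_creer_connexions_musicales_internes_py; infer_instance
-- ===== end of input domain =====

-- B filters the non-empty group names once and builds the pairs from that list, replacing A's nested i<j scan; objective: simpler.


-- shared constant-record builder (the fixed dict literal of both Pythons)
def pvConn (source cible : String) : List (String × String) :=
  [("source", source), ("cible", cible), ("type", "optimisation_musicale"), ("force", "forte")]

-- ===== PORT A =====
def creer_connexions_musicales_internes_py (groupes : List (String × List String)) : List (List (String × String)) :=
  (PySem.List.enumerate groupes).foldl (fun connexions ip =>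
    (PySem.List.enumerate groupes).foldl (fun cx jp =>
      if ip.1 < jp.1 ∧ ip.2.2 ≠ [] ∧ jp.2.2 ≠ [] then cx ++ [pvConn ip.2.1 jp.2.1] else cx)
      connexions) []

-- ===== PORT B =====
-- the while-pop(0)/for loop of Source B: pair the head name with every remaining name
def pvPairs : List String → List (List (String × String))
  | [] => []
  | source :: rest => rest.map (fun cible => pvConn source cible) ++ pvPairs rest

def creer_connexions_musicales_internes_py_alt (groupes : List (String × List String)) : List (List (String × String)) :=
  pvPairs ((groupes.filter (fun p => decide (p.2 ≠ []))).map Prod.fst)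

-- ===== PRECONDITION & SPEC =====
def Spec_creer_connexions_musicales_internes_py (groupes : List (String × List String)) (out : List (List (String × String))) : Prop := out = creer_connexions_musicales_internes_py_alt groupes
instance (groupes : List (String × List String)) (out : List (List (String × String))) : Decidable (Spec_creer_connexions_musicales_internes_py groupes out) := by unfold Spec_creer_connexions_musicales_internes_py; infer_instance

-- ===== CLAIM (what is proved, stated in full; the proofs are below) =====
def Claim_equal_creer_connexions_musicales_internes_py : Prop := ∀ (groupes : List (String × List String)), Dom_creer_connexions_musicales_internes_py groupes → Spec_creer_connexions_musicales_internes_py groupes (creer_connexions_musicales_internes_py groupes)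

-- ===== LEMMAS AND PROOFS =====

-- A's inner loop over the enumerated full list, started at index k, appends exactly
-- the connections to the non-empty groups located after position i.
lemma pv_inner_eq (i : Int) (g1 : String) (e1 : List String)
    (l : List (String × List String)) :
    ∀ (k : Int) (acc : List (List (String × String))),
    (PySem.List.enumerate l k).foldl (fun cx jp =>
      if i < jp.1 ∧ e1 ≠ [] ∧ jp.2.2 ≠ [] then cx ++ [pvConn g1 jp.2.1] else cx) acc
    = acc ++ (if e1 = [] then [] else
        ((l.drop (i + 1 - k).toNat).filter (fun p => decide (p.2 ≠ []))).map (fun p => pvConn g1 p.1)) := by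
  induction l with
  | nil =>
      intro k acc
      simp [PySem.List.enumerate_nil]
  | cons p tl ih =>
      intro k acc
      rw [PySem.List.enumerate_cons, List.foldl_cons, ih (k + 1)]
      by_cases he1 : e1 = []
      · simp [he1]
      · by_cases hik : i < k
        · have h0 : (i + 1 - k).toNat = 0 := by omega
          have h0' : (i - k).toNat = 0 := by omega
          by_cases hp : p.2 = []
          · simp [he1, hik, hp, h0, h0']
          · simp [he1, hik, hp, h0, h0']
        · have h1 : (i + 1 - k).toNat = (i - k).toNat + 1 := by omega
          simp [he1, hik, h1]

-- A's outer loop over a suffix tl of the full list (starting at index k, tl = full.drop k)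
-- produces the pairs of the non-empty names of tl.
lemma pv_outer_eq (full : List (String × List String)) :
    ∀ (tl : List (String × List String)) (k : Int) (acc : List (List (String × String))),
    0 ≤ k → full.drop k.toNat = tl →
    (PySem.List.enumerate tl k).foldl (fun connexions ip =>
      (PySem.List.enumerate full 0).foldl (fun cx jp =>
        if ip.1 < jp.1 ∧ ip.2.2 ≠ [] ∧ jp.2.2 ≠ [] then cx ++ [pvConn ip.2.1 jp.2.1] else cx)
        connexions) acc
    = acc ++ pvPairs ((tl.filter (fun p => decide (p.2 ≠ []))).map Prod.fst) := by
  intro tl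
  induction tl with
  | nil =>
      intro k acc hk htl
      simp [PySem.List.enumerate_nil, pvPairs]
  | cons p tl' ih =>
      intro k acc hk htl
      have htl' : full.drop (k + 1).toNat = tl' := by
        have h1 : (k + 1).toNat = k.toNat + 1 := by omega
        rw [h1, ← List.drop_drop, htl]
        simp
      rw [PySem.List.enumerate_cons, List.foldl_cons]
      have hin := pv_inner_eq k p.1 p.2 full 0 acc
      simp only [] at hin
      rw [hin, ih (k + 1) _ (by omega) htl']
      by_cases hp : p.2 = []
      · simp [hp]
      · have hd : (k + 1 - 0).toNat = (k + 1).toNat := by omega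
        rw [hd, htl']
        simp [hp, pvPairs, List.map_map, Function.comp]


-- ===== VERDICT (by name: the statement is the Claim_ definition above) =====
theorem creer_connexions_musicales_internes_py_spec : Claim_equal_creer_connexions_musicales_internes_py := by
  intro groupes _
  unfold Spec_creer_connexions_musicales_internes_py
  unfold creer_connexions_musicales_internes_py creer_connexions_musicales_internes_py_alt
  rw [pv_outer_eq groupes groupes 0 [] (by omega) (by simp)]
  simp
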